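-- pv_equiv track=rewrite | github.com/tohmakobayashi1016/RL-StringOp | Edited examples/Playground.py | custom_mesh_distance_pairwise
-- ===== SOURCE A (Python) =====
-- def count_non_overlapping_a_pairs(string):
--     """
--     Count the number of valid non-overlapping pairs of 'a' characters in a string.
--     A valid pair consists of any two 'a' characters, either adjacent or separated
--     by any number of characters, but once a pair is found, those positions are ignored.
--
--     Args:
--     string (str): The input string.
--
--     Returns:
--     int: The number of valid non-overlapping 'a' pairs.
--     """
--     # Find all positions of 'a' characters in the string
--     a_positions = [i for i, char in enumerate(string) if char == 'a']
--
--     # Count non-overlapping pairs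
--     count = 0
--     i = 0
--     while i < len(a_positions) - 1:
--         # If we find a valid pair, we skip the next position (non-overlapping)
--         count += 1
--         i += 2  # Move by 2 to ensure we don't overlap the pair
--
--     return count
--
-- def custom_mesh_distance_pairwise(list1, list2):
--     """
--     Calculate the pairwise mesh distance between two lists of strings based on non-overlapping 'a' pairs.
--     This distance counts the number of 'a' pairs in the target string
--     that are missing from the current string.
--
--     Args:
--     list1 (list): A list of strings.
--     list2 (list): A list of strings (same length as list1).
--
--     Returns:
--     list: A list of mesh distances (number of 'a' pairs needed) for each pair of strings.
--     """
--     # Ensure both lists have the same length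
--     if len(list1) != len(list2):
--         raise ValueError("Lists must have the same length.")
--
--     distances = []
--
--     # Calculate the mesh distance for each pair of strings
--     for current_string, target_string in zip(list1, list2):
--         # Count the non-overlapping 'a' pairs in both the current and target strings
--         current_a_pairs = count_non_overlapping_a_pairs(current_string)
--         target_a_pairs = count_non_overlapping_a_pairs(target_string)
--
--         # The mesh distance is the number of 'a' pairs needed
--         # If the current string already has more or equal pairs, the distance is zero
--         distance = max(0, target_a_pairs - current_a_pairs)
--         distances.append(distance)
--
--     return distances
-- ===== SOURCE B (Python) =====
-- def _a_pairs(string):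
--     # One-pass greedy matcher: an 'a' either opens a pair or closes the open one.
--     pairs = 0
--     open_a = False
--     for ch in string:
--         if ch == 'a':
--             if open_a:
--                 pairs += 1
--                 open_a = False
--             else:
--                 open_a = True
--     return pairs
--
--
-- def custom_mesh_distance_pairwise(list1, list2):
--     if len(list1) != len(list2):
--         raise ValueError("Lists must have the same length.")
--     return [max(_a_pairs(target) - _a_pairs(current), 0)
--             for current, target in zip(list1, list2)]
-- ===== Notes on version B (the rewrite author's own statement) =====
-- stated objective: alternative
-- what changed: Replaces the position-list builder plus index-stepping while-loop with a one-pass greedy toggle automaton (an 'a' opens a pair or closes the open one), folded over each string, with the pairwise clamp in a comprehension.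
import Mathlib
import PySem

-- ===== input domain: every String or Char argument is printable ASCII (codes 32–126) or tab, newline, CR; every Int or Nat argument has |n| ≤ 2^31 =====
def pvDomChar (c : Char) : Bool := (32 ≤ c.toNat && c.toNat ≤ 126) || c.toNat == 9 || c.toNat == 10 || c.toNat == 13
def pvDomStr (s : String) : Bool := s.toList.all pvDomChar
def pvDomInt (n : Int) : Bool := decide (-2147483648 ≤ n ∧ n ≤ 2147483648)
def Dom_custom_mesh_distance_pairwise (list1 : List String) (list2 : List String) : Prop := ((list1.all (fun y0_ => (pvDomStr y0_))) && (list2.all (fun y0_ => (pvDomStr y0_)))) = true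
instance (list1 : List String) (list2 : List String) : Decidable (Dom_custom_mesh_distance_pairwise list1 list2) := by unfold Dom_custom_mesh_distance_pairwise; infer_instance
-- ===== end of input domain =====

-- B replaces A's position-list builder and index-stepping while-loop by a one-pass greedy
-- toggle automaton over each string (objective: alternative, same cost).
-- Both programs raise ValueError on lists of different lengths; Pre_ excludes exactly that.

-- ===== PORT A =====
-- the 'while i < len(a_positions) - 1: count += 1; i += 2' loop, step for step
def pvPairLoopA (n : Int) (count : Int) (i : Int) : Int :=
  if i < n - 1 then pvPairLoopA n (count + 1) (i + 2) else count
  termination_by (n - 1 - i).toNat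
  decreasing_by omega

def pvCountNonOverlappingAPairs (s : String) : Int :=
  let a_positions : List Int :=
    ((PySem.List.enumerate s.toList).filter (fun p => p.2 == 'a')).map (fun p => p.1)
  pvPairLoopA (a_positions.length : Int) 0 0

def custom_mesh_distance_pairwise (list1 : List String) (list2 : List String) : List Int :=
  if list1.length ≠ list2.length then []  -- Python raises ValueError here; excluded by Pre_
  else
    (list1.zip list2).foldl
      (fun distances p =>
        let current_a_pairs := pvCountNonOverlappingAPairs p.1
        let target_a_pairs := pvCountNonOverlappingAPairs p.2
        distances ++ [max 0 (target_a_pairs - current_a_pairs)])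
      []

-- ===== PORT B =====
-- one-pass automaton: an 'a' opens a pair or closes the open one; state = (pairs, open_a)
def pvAPairsStep (st : Int × Bool) (ch : Char) : Int × Bool :=
  if ch = 'a' then (if st.2 then (st.1 + 1, false) else (st.1, true)) else st

def pvAPairs (s : String) : Int := (s.toList.foldl pvAPairsStep (0, false)).1

def custom_mesh_distance_pairwise_alt (list1 : List String) (list2 : List String) : List Int :=
  if list1.length ≠ list2.length then []  -- Python raises ValueError here; excluded by Pre_
  else (list1.zip list2).map (fun p => max (pvAPairs p.2 - pvAPairs p.1) 0)

-- ===== PRECONDITION & SPEC =====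
-- Pre_ excludes exactly the inputs where A raises ValueError (different lengths).
def Pre_custom_mesh_distance_pairwise (list1 : List String) (list2 : List String) : Prop :=
  list1.length = list2.length
instance (list1 : List String) (list2 : List String) : Decidable (Pre_custom_mesh_distance_pairwise list1 list2) := by unfold Pre_custom_mesh_distance_pairwise; infer_instance

def pvWitness_custom_mesh_distance_pairwise : List String × List String :=
  (["aba", "b"], ["aaaa", "aa"])

def Spec_custom_mesh_distance_pairwise (list1 : List String) (list2 : List String) (out : List Int) : Prop := out = custom_mesh_distance_pairwise_alt list1 list2
instance (list1 : List String) (list2 : List String) (out : List Int) : Decidable (Spec_custom_mesh_distance_pairwise list1 list2 out) := by unfold Spec_custom_mesh_distance_pairwise; infer_instance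

-- ===== CLAIM (what is proved, stated in full; the proofs are below) =====
def Claim_equal_custom_mesh_distance_pairwise : Prop := ∀ (list1 : List String) (list2 : List String), Dom_custom_mesh_distance_pairwise list1 list2 → Pre_custom_mesh_distance_pairwise list1 list2 → Spec_custom_mesh_distance_pairwise list1 list2 (custom_mesh_distance_pairwise list1 list2)

-- ===== LEMMAS AND PROOFS =====

-- A's while-loop computes count + max 0 ((n - i) / 2)
theorem pvPairLoopA_eq (n count i : Int) :
    pvPairLoopA n count i = count + max 0 ((n - i) / 2) := by
  induction count, i using pvPairLoopA.induct (n := n) with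
  | case1 count i hlt ih =>
      rw [pvPairLoopA, if_pos hlt, ih]
      omega
  | case2 count i hge =>
      rw [pvPairLoopA, if_neg hge]
      omega

-- A's filtered enumerate has as many entries as there are 'a's
theorem pvEnumFilter_length (l : List Char) :
    ∀ (st : Int), (((PySem.List.enumerate l st).filter (fun p => p.2 == 'a')).map (fun p => p.1)).length
      = l.count 'a' := by
  induction l with
  | nil => intro st; simp [PySem.List.enumerate]
  | cons h t ih =>
      intro st
      by_cases hc : h = 'a'
      · subst hc
        simp [PySem.List.enumerate_cons, ih (st + 1)]
      · simp [PySem.List.enumerate_cons, hc, ih (st + 1)]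

-- B's automaton fold: starting from (p, b) it adds ⌊(count 'a' + b)/2⌋ pairs
theorem pvAPairsFold_eq (l : List Char) :
    ∀ (p : Int) (b : Bool),
      (l.foldl pvAPairsStep (p, b)).1
        = p + (((l.count 'a' + (if b then 1 else 0)) / 2 : Nat) : Int) := by
  induction l with
  | nil => intro p b; cases b <;> simp
  | cons h t ih =>
      intro p b
      by_cases hc : h = 'a'
      · subst hc
        cases b with
        | false =>
            simp [pvAPairsStep, ih p true]
        | true =>
            have := ih (p + 1) false
            simp [pvAPairsStep, this]
            omega
      · simp [pvAPairsStep, hc, ih p b]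

-- both per-string counters equal ⌊count 'a' / 2⌋
theorem pvCount_eq (s : String) : pvCountNonOverlappingAPairs s = pvAPairs s := by
  unfold pvCountNonOverlappingAPairs pvAPairs
  rw [pvPairLoopA_eq, pvEnumFilter_length s.toList 0, pvAPairsFold_eq s.toList 0 false]
  have h := Int.natCast_div (s.toList.count 'a') 2
  simp
  omega

-- ===== VERDICT (by name: the statement is the Claim_ definition above) =====
theorem custom_mesh_distance_pairwise_spec : Claim_equal_custom_mesh_distance_pairwise := by
  intro list1 list2 _ hpre
  unfold Spec_custom_mesh_distance_pairwise custom_mesh_distance_pairwise custom_mesh_distance_pairwise_alt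
  rw [if_neg (by simpa using hpre), if_neg (by simpa using hpre)]
  rw [PySem.List.foldl_append_singleton_eq_map]
  exact List.map_congr_left (fun p _ => by simp [pvCount_eq, max_comm])
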